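-- pv_equiv track=rewrite | github.com/vectorFox/Lumina-Layers | core/vector_engine.py | _build_channel_runs
-- ===== SOURCE A (Python) =====
-- def _build_channel_runs(recipe, layers_to_use, num_channels):
--     """Build contiguous layer runs grouped by channel.
--
--     Returns:
--         dict[channel_id] -> list of (start_layer, end_layer)
--     """
--     runs_by_channel = {}
--     if layers_to_use <= 0:
--         return runs_by_channel
--
--     run_start = 0
--     run_channel = int(recipe[0])
--     for z in range(1, layers_to_use + 1):
--         current_channel = int(recipe[z]) if z < layers_to_use else None
--         if current_channel != run_channel:
--             if 0 <= run_channel < num_channels: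
--                 runs_by_channel.setdefault(run_channel, []).append((run_start, z - 1))
--             run_start = z
--             run_channel = current_channel
--
--     return runs_by_channel
-- ===== SOURCE B (Python) =====
-- def _build_channel_runs(recipe, layers_to_use, num_channels):
--     """Two-pointer chunk scan: materialize the channel list, then consume one
--     maximal equal-channel chunk [i, j) per outer step (no change-boundary sentinel)."""
--     runs_by_channel = {}
--     if layers_to_use <= 0:
--         return runs_by_channel
--     chs = [int(recipe[z]) for z in range(layers_to_use)]
--     n = layers_to_use
--     i = 0
--     while i < n:
--         c = chs[i]
--         j = i + 1
--         while j < n and chs[j] == c: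
--             j += 1
--         if 0 <= c < num_channels:
--             runs_by_channel.setdefault(c, []).append((i, j - 1))
--         i = j
--     return runs_by_channel
-- ===== Notes on version B (the rewrite author's own statement) =====
-- stated objective: alternative
-- what changed: Replaces A's change-boundary detection with a None sentinel and per-iteration state (run_start, run_channel) by a two-pointer chunk scan over a materialized channel list that emits each maximal equal-channel run in one outer step.
import Mathlib
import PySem

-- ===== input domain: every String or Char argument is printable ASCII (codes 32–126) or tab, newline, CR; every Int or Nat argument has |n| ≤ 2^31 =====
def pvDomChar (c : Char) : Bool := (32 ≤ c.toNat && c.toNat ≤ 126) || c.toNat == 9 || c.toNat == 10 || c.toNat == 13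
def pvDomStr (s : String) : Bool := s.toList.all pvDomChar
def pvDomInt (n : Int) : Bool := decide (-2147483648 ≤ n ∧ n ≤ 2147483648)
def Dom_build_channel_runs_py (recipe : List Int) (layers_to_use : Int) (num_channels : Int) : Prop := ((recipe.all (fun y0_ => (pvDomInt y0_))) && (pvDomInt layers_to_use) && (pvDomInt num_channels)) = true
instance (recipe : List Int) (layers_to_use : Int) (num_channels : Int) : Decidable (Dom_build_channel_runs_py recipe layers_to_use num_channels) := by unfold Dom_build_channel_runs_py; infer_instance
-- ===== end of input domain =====

-- B replaces A's None-sentinel change-boundary loop by a two-pointer chunk scan (alternative decomposition, same cost).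

-- ===== PORT A =====
-- loop body of A's `for z in range(1, layers_to_use + 1)`; state = (runs_by_channel, run_start, run_channel)
-- `setdefault(rc, []).append(p)` is `Dict.modify rc [] (· ++ [p])` (existing key keeps its position, new key appends)
def stepA (recipe : List Int) (layers_to_use : Int) (num_channels : Int)
    (st : PySem.Dict Int (List (Int × Int)) × Int × Option Int) (z : Int) :
    PySem.Dict Int (List (Int × Int)) × Int × Option Int :=
  let d := st.1
  let run_start := st.2.1
  let run_channel := st.2.2
  let current : Option Int := if z < layers_to_use then some (PySem.List.pyGetD recipe z 0) else none
  if current ≠ run_channel then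
    let d' := match run_channel with
      | some rc => if 0 ≤ rc ∧ rc < num_channels then d.modify rc [] (· ++ [(run_start, z - 1)]) else d
      | none => d  -- unreachable while the loop runs (run_channel is None only after the last iteration)
    (d', z, current)
  else st

def build_channel_runs_py (recipe : List Int) (layers_to_use : Int) (num_channels : Int) : List (Int × List (Int × Int)) :=
  if layers_to_use ≤ 0 then (PySem.Dict.empty : PySem.Dict Int (List (Int × Int))).items
  else
    ((PySem.List.pyRange 1 (layers_to_use + 1) 1).foldl (stepA recipe layers_to_use num_channels)
      (PySem.Dict.empty, 0, some (PySem.List.pyGetD recipe 0 0))).1.items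

-- ===== PORT B =====
-- inner `while j < n and chs[j] == c: j += 1` of Source B; the Nat argument is fuel
-- (a totality guard only: it is always called with enough fuel to finish the scan)
def bScanJ (chs : List Int) (c : Int) (n : Int) : Nat → Int → Int
  | 0, j => j
  | fuel + 1, j => if j < n ∧ PySem.List.pyGetD chs j 0 = c then bScanJ chs c n fuel (j + 1) else j

-- outer `while i < n:` loop of Source B; state = (i, runs_by_channel); Nat argument is fuel
def bLoopI (chs : List Int) (num_channels : Int) (n : Int) : Nat → Int → PySem.Dict Int (List (Int × Int)) → PySem.Dict Int (List (Int × Int))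
  | 0, _, d => d
  | fuel + 1, i, d =>
    if i < n then
      let c := PySem.List.pyGetD chs i 0
      let j := bScanJ chs c n fuel (i + 1)
      let d' := if 0 ≤ c ∧ c < num_channels then d.modify c [] (· ++ [(i, j - 1)]) else d
      bLoopI chs num_channels n fuel j d'
    else d

def build_channel_runs_py_alt (recipe : List Int) (layers_to_use : Int) (num_channels : Int) : List (Int × List (Int × Int)) :=
  if layers_to_use ≤ 0 then (PySem.Dict.empty : PySem.Dict Int (List (Int × Int))).items
  else
    let chs := (PySem.List.pyRange 0 layers_to_use 1).map (fun z => PySem.List.pyGetD recipe z 0)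
    (bLoopI chs num_channels layers_to_use layers_to_use.toNat 0 PySem.Dict.empty).items

-- ===== PRECONDITION & SPEC =====
-- Pre_ excludes exactly the inputs where A raises IndexError: 0 < layers_to_use but recipe is shorter than layers_to_use.
def Pre_build_channel_runs_py (recipe : List Int) (layers_to_use : Int) (num_channels : Int) : Prop :=
  layers_to_use ≤ 0 ∨ layers_to_use ≤ (recipe.length : Int)
instance (recipe : List Int) (layers_to_use : Int) (num_channels : Int) : Decidable (Pre_build_channel_runs_py recipe layers_to_use num_channels) := by unfold Pre_build_channel_runs_py; infer_instance

def pvWitness_build_channel_runs_py : List Int × Int × Int := ([0, 0, 1, 0], 4, 2)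

def Spec_build_channel_runs_py (recipe : List Int) (layers_to_use : Int) (num_channels : Int) (out : List (Int × List (Int × Int))) : Prop := out = build_channel_runs_py_alt recipe layers_to_use num_channels
instance (recipe : List Int) (layers_to_use : Int) (num_channels : Int) (out : List (Int × List (Int × Int))) : Decidable (Spec_build_channel_runs_py recipe layers_to_use num_channels out) := by unfold Spec_build_channel_runs_py; infer_instance

-- ===== CLAIM (what is proved, stated in full; the proofs are below) =====
def Claim_equal_build_channel_runs_py : Prop := ∀ (recipe : List Int) (layers_to_use : Int) (num_channels : Int), Dom_build_channel_runs_py recipe layers_to_use num_channels → Pre_build_channel_runs_py recipe layers_to_use num_channels → Spec_build_channel_runs_py recipe layers_to_use num_channels (build_channel_runs_py recipe layers_to_use num_channels)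

-- ===== LEMMAS AND PROOFS =====

-- proof-side reformulation of B's outer loop as structural consumption of the channel list
def runLen (c : Int) : List Int → Nat
  | [] => 0
  | x :: xs => if x = c then runLen c xs + 1 else 0

def bLoop (num_channels : Int) : List Int → Int → PySem.Dict Int (List (Int × Int)) → PySem.Dict Int (List (Int × Int))
  | [], _, d => d
  | c :: rest, pos, d =>
    let m := runLen c rest
    let k : Int := 1 + m
    let d' := if 0 ≤ c ∧ c < num_channels then d.modify c [] (· ++ [(pos, pos + k - 1)]) else d
    bLoop num_channels (rest.drop m) (pos + k) d'
  termination_by l => l.length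
  decreasing_by simp only [List.length_drop, List.length_cons]; omega


theorem pvWitness_ok : Dom_build_channel_runs_py (pvWitness_build_channel_runs_py.1) (pvWitness_build_channel_runs_py.2.1) (pvWitness_build_channel_runs_py.2.2) ∧ Pre_build_channel_runs_py (pvWitness_build_channel_runs_py.1) (pvWitness_build_channel_runs_py.2.1) (pvWitness_build_channel_runs_py.2.2) := by
  constructor <;> decide

theorem runLen_le (c : Int) (l : List Int) : runLen c l ≤ l.length := by
  induction l with
  | nil => simp [runLen]
  | cons x xs ih => simp only [runLen]; split <;> simp <;> omega

theorem runLen_get (c : Int) (l : List Int) : ∀ j (hj : j < runLen c l) (hl : j < l.length), l[j] = c := by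
  induction l with
  | nil => simp [runLen]
  | cons x xs ih =>
    intro j hj hl
    simp only [runLen] at hj
    split at hj
    · cases j with
      | zero => simpa using ‹x = c›
      | succ j' => simpa using ih j' (by omega) (by simpa using Nat.lt_of_succ_lt_succ hl)
    · omega

theorem runLen_stop (c : Int) (l : List Int) (h : runLen c l < l.length) : l[runLen c l] ≠ c := by
  induction l with
  | nil => simp [runLen] at h
  | cons x xs ih =>
    simp only [runLen] at h ⊢
    split
    · rename_i hx
      simpa using ih (by simpa using Nat.lt_of_succ_lt_succ (by simpa [hx] using h))
    · simpa using ‹¬ x = c›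

-- fold over identical-channel indices leaves the state unchanged
theorem skip_lemma (recipe : List Int) (nc : Int) (n : Nat) (c : Int) :
    ∀ (m a : Nat) (d : PySem.Dict Int (List (Int × Int))) (s : Int),
    a + m ≤ n →
    (∀ t : Nat, a ≤ t → t < a + m → PySem.List.pyGetD recipe (t : Int) 0 = c) →
    (PySem.List.pyRange (a : Int) ((n : Int) + 1) 1).foldl (stepA recipe n nc) (d, s, some c)
    = (PySem.List.pyRange ((a + m : Nat) : Int) ((n : Int) + 1) 1).foldl (stepA recipe n nc) (d, s, some c) := by
  intro m
  induction m with
  | zero => intro a d s _ _; rfl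
  | succ m ih =>
    intro a d s hle hall
    have ha : (a : Int) < (n : Int) + 1 := by push_cast; omega
    rw [PySem.List.pyRange_one_cons ha]
    have hstep : stepA recipe n nc (d, s, some c) (a : Int) = (d, s, some c) := by
      have hzn : ((a : Int) < (n : Int)) = True := by simp; omega
      simp only [stepA, hzn, if_true]
      have : PySem.List.pyGetD recipe (a : Int) 0 = c := hall a le_rfl (by omega)
      simp [this]
    rw [List.foldl_cons, hstep]
    have hcast : ((a : Int) + 1) = ((a + 1 : Nat) : Int) := by push_cast; ring
    rw [hcast, ih (a + 1) d s (by omega) (fun t h1 h2 => hall t (by omega) (by omega))]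
    congr 2
    push_cast; ring

-- main invariant: from a run start, A's remaining fold equals B's chunk loop
theorem run_lemma (recipe : List Int) (nc : Int) (n : Nat)
    (chs : List Int)
    (hch : chs = (PySem.List.pyRange 0 (n : Int) 1).map (fun z => PySem.List.pyGetD recipe z 0)) :
    ∀ (fuel : Nat) (rest : List Int) (c : Int) (s : Nat) (d : PySem.Dict Int (List (Int × Int))),
    rest.length + 1 ≤ fuel →
    chs.drop s = c :: rest →
    ((PySem.List.pyRange ((s + 1 : Nat) : Int) ((n : Int) + 1) 1).foldl (stepA recipe n nc) (d, (s : Int), some c)).1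
    = bLoop nc (c :: rest) (s : Int) d := by
  have hlen : chs.length = n := by
    simp [hch, PySem.List.length_pyRange_one]
  have hget : ∀ (k : Nat) (hk : k < n), chs[k]'(by omega) = PySem.List.pyGetD recipe (k : Int) 0 := by
    intro k hk
    subst hch
    rw [List.getElem_map, PySem.List.getElem_pyRange_one]
    simp
  intro fuel
  induction fuel with
  | zero => intro rest c s d h; omega
  | succ fuel ih =>
    intro rest c s d hfuel hdrop
    have hs : s < n := by
      by_contra h
      have : chs.drop s = [] := List.drop_eq_nil_of_le (by omega)
      simp [this] at hdrop
    have hrest : s + 1 + rest.length = n := by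
      have := congrArg List.length hdrop
      simp [List.length_drop, hlen] at this
      omega
    have hdrop1 : chs.drop (s + 1) = rest := by
      have : chs.drop (s + 1) = (chs.drop s).drop 1 := by rw [List.drop_drop]
      simp [this, hdrop]
    have hget? : ∀ (t : Nat), t < n → chs[t]? = some (PySem.List.pyGetD recipe (t : Int) 0) := by
      intro t ht
      rw [List.getElem?_eq_getElem (by omega), hget t ht]
    have hrest? : ∀ j : Nat, rest[j]? = chs[s + 1 + j]? := by
      intro j
      rw [← hdrop1, List.getElem?_drop]
    set m := runLen c rest with hm
    have hmle : m ≤ rest.length := runLen_le c rest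
    -- identical steps over the run body
    have hrun : ∀ t : Nat, s + 1 ≤ t → t < s + 1 + m → PySem.List.pyGetD recipe (t : Int) 0 = c := by
      intro t h1 h2
      have hj : t - (s + 1) < m := by omega
      have htn : t < n := by omega
      have hrc := runLen_get c rest (t - (s + 1)) hj (by omega)
      have e1 : rest[t - (s + 1)]? = some c := by
        rw [List.getElem?_eq_getElem (by omega), hrc]
      have e2 : chs[s + 1 + (t - (s + 1))]? = some c := by rw [← hrest?, e1]
      have h3 : s + 1 + (t - (s + 1)) = t := by omega
      rw [h3, hget? t htn] at e2
      exact Option.some.inj e2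
    rw [skip_lemma recipe nc n c m (s + 1) d (s : Int) (by omega) hrun]
    -- unfold B one step
    simp only [bLoop, ← hm]
    by_cases hend : s + 1 + m = n
    · -- last chunk: boundary is the None sentinel at z = n
      have hmfull : m = rest.length := by omega
      have h1 : ((s + 1 + m : Nat) : Int) = (n : Int) := by omega
      rw [h1, PySem.List.pyRange_one_cons (by omega), PySem.List.pyRange_one_eq_nil (by omega)]
      have hstep : stepA recipe n nc (d, (s : Int), some c) (n : Int) =
          ((if 0 ≤ c ∧ c < nc then d.modify c [] (· ++ [((s : Int), (n : Int) - 1)]) else d), (n : Int), none) := by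
        simp [stepA]
      rw [List.foldl_cons, hstep, List.foldl_nil]
      have hdropm : rest.drop m = [] := by simp [hmfull]
      rw [hdropm]; simp only [bLoop]
      have hcoord : (s : Int) + (1 + (m : Int)) - 1 = (n : Int) - 1 := by omega
      rw [hcoord]
    · -- interior boundary: next chunk starts at z = s + 1 + m
      have hmlt : m < rest.length := by omega
      have hznlt : s + 1 + m < n := by omega
      rw [PySem.List.pyRange_one_cons (by push_cast; omega)]
      have hne : PySem.List.pyGetD recipe ((s + 1 + m : Nat) : Int) 0 = rest[m]'(by omega) := by
        have e1 : rest[m]? = some (rest[m]'(by omega)) := List.getElem?_eq_getElem (by omega)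
        have e2 := hrest? m
        rw [e1, hget? (s + 1 + m) hznlt] at e2
        exact (Option.some.inj e2.symm)
      have hneq : rest[m]'(by omega) ≠ c := runLen_stop c rest (by omega)
      have hstep : stepA recipe n nc (d, (s : Int), some c) ((s + 1 + m : Nat) : Int) =
          ((if 0 ≤ c ∧ c < nc then d.modify c [] (· ++ [((s : Int), ((s + 1 + m : Nat) : Int) - 1)]) else d),
           ((s + 1 + m : Nat) : Int), some (rest[m]'(by omega))) := by
      
        have hzn : (((s + 1 + m : Nat) : Int) < (n : Int)) = True := by simp; omega
        simp only [stepA, hzn, if_true, hne]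
        simp [hneq]
      rw [List.foldl_cons, hstep]
      -- next chunk
      have hdropnext : chs.drop (s + 1 + m) = rest[m]'(by omega) :: rest.drop (m + 1) := by
        have : chs.drop (s + 1 + m) = rest.drop m := by
          rw [← hdrop1, List.drop_drop]
        rw [this, List.drop_eq_getElem_cons hmlt]
      have hdm : rest.drop m = rest[m]'(by omega) :: rest.drop (m + 1) := List.drop_eq_getElem_cons hmlt
      have hcast : ((s + 1 + m : Nat) : Int) + 1 = ((s + 1 + m + 1 : Nat) : Int) := by push_cast; ring
      rw [hcast]
      have := ih (rest.drop (m + 1)) (rest[m]'(by omega)) (s + 1 + m)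
        (if 0 ≤ c ∧ c < nc then d.modify c [] (· ++ [((s : Int), ((s + 1 + m : Nat) : Int) - 1)]) else d)
        (by simp [List.length_drop]; omega) hdropnext
      rw [this, hdm]
      have hpos : (s : Int) + (1 + (m : Int)) = ((s + 1 + m : Nat) : Int) := by push_cast; ring
      rw [hpos]


theorem bScanJ_drop (chs : List Int) (c : Int) :
    ∀ (fuel : Nat) (j : Nat), chs.length - j ≤ fuel →
    bScanJ chs c (chs.length : Int) fuel ((j : Nat) : Int) = (((j + runLen c (chs.drop j) : Nat)) : Int) := by
  intro fuel
  induction fuel with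
  | zero =>
    intro j h
    have hdrop : chs.drop j = [] := List.drop_eq_nil_of_le (by omega)
    rw [bScanJ, hdrop]
    simp [runLen]
  | succ fuel ih =>
    intro j h
    by_cases hlt : j < chs.length
    · have hidx : PySem.List.pyGetD chs ((j : Nat) : Int) 0 = chs[j]'hlt := by
        simp [List.getElem?_eq_getElem hlt]
      have hdropj : chs.drop j = chs[j]'hlt :: chs.drop (j + 1) := List.drop_eq_getElem_cons hlt
      by_cases heq : chs[j]'hlt = c
      · rw [bScanJ]
        rw [if_pos ⟨by omega, by rw [hidx, heq]⟩]
        rw [show ((j : Nat) : Int) + 1 = (((j + 1 : Nat)) : Int) by push_cast; ring]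
        rw [ih (j + 1) (by omega), hdropj]
        simp only [runLen, heq, if_pos]
        omega
      · rw [bScanJ]
        have hc : ¬ (((j : Nat) : Int) < (chs.length : Int) ∧ PySem.List.pyGetD chs ((j : Nat) : Int) 0 = c) := by
          intro hc
          exact heq (by rw [← hidx]; exact hc.2)
        rw [if_neg hc, hdropj]
        simp [runLen, heq]
    · have hdrop : chs.drop j = [] := List.drop_eq_nil_of_le (by omega)
      rw [bScanJ]
      have hc : ¬ (((j : Nat) : Int) < (chs.length : Int) ∧ PySem.List.pyGetD chs ((j : Nat) : Int) 0 = c) := by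
        intro hc; have := hc.1; omega
      rw [if_neg hc, hdrop]
      simp [runLen]

-- B's fuelled index loop equals the structural chunk loop it was analysed through
theorem bLoopI_eq_bLoop (chs : List Int) (nc : Int) :
    ∀ (fuel : Nat) (i : Nat) (d : PySem.Dict Int (List (Int × Int))), chs.length - i ≤ fuel →
    bLoopI chs nc (chs.length : Int) fuel ((i : Nat) : Int) d = bLoop nc (chs.drop i) ((i : Nat) : Int) d := by
  intro fuel
  induction fuel with
  | zero =>
    intro i d h
    rw [bLoopI, List.drop_eq_nil_of_le (by omega)]
    simp only [bLoop]
  | succ fuel ih =>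
    intro i d h
    by_cases hlt : i < chs.length
    · have hidx : PySem.List.pyGetD chs ((i : Nat) : Int) 0 = chs[i]'hlt := by
        simp [List.getElem?_eq_getElem hlt]
      have hdropi : chs.drop i = chs[i]'hlt :: chs.drop (i + 1) := List.drop_eq_getElem_cons hlt
      rw [bLoopI, if_pos (by omega : ((i : Nat) : Int) < (chs.length : Int))]
      simp only [hidx]
      rw [show ((i : Nat) : Int) + 1 = (((i + 1 : Nat)) : Int) by push_cast; ring]
      rw [bScanJ_drop chs (chs[i]'hlt) fuel (i + 1) (by omega)]
      have hmle := runLen_le (chs[i]'hlt) (chs.drop (i + 1))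
      rw [List.length_drop] at hmle
      rw [ih (i + 1 + runLen (chs[i]'hlt) (chs.drop (i + 1))) _ (by omega)]
      rw [hdropi]
      simp only [bLoop]
      have hdd : (chs.drop (i + 1)).drop (runLen (chs[i]'hlt) (chs.drop (i + 1)))
          = chs.drop (i + 1 + runLen (chs[i]'hlt) (chs.drop (i + 1))) := by
        rw [List.drop_drop]
      rw [hdd]
      have h1 : ((i : Nat) : Int) + (1 + (runLen (chs[i]'hlt) (chs.drop (i + 1)) : Int))
          = (((i + 1 + runLen (chs[i]'hlt) (chs.drop (i + 1)) : Nat)) : Int) := by push_cast; ring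
      rw [h1]
    · rw [bLoopI, if_neg (by omega : ¬ (((i : Nat) : Int) < (chs.length : Int))),
        List.drop_eq_nil_of_le (by omega)]
      simp only [bLoop]

-- ===== VERDICT (by name: the statement is the Claim_ definition above) =====
theorem build_channel_runs_py_spec : Claim_equal_build_channel_runs_py := by
  intro recipe layers_to_use num_channels _ _
  unfold Spec_build_channel_runs_py build_channel_runs_py build_channel_runs_py_alt
  by_cases h0 : layers_to_use ≤ 0
  · simp [h0]
  · simp only [h0, if_false]
    set n : Nat := layers_to_use.toNat with hn
    have hlyr : layers_to_use = (n : Int) := by omega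
    have hn1 : 1 ≤ n := by omega
    set chs := (PySem.List.pyRange 0 (n : Int) 1).map (fun z => PySem.List.pyGetD recipe z 0) with hch
    have hlen : chs.length = n := by simp [hch, PySem.List.length_pyRange_one]
    have hne : chs ≠ [] := by intro h; rw [h] at hlen; simp at hlen; omega
    obtain ⟨c, rest, hcr⟩ := List.exists_cons_of_ne_nil hne
    have hc0 : c = PySem.List.pyGetD recipe 0 0 := by
      have h1 : chs[0]? = some c := by rw [hcr]; rfl
      have h2 : chs[0]? = some (PySem.List.pyGetD recipe 0 0) := by
        rw [hch, List.getElem?_map, PySem.List.pyRange_one_cons (show (0 : Int) < (n : Int) by omega)]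
        rfl
      exact Option.some.inj (h1.symm.trans h2)
    have hdrop : chs.drop 0 = c :: rest := by simpa using hcr
    have hmain := run_lemma recipe num_channels n chs hch (rest.length + 1) rest c 0 PySem.Dict.empty le_rfl hdrop
    simp only [show ((0 : Nat) + 1 : Nat) = (1 : Nat) from rfl, Nat.cast_one, Nat.cast_zero] at hmain
    have hbr := bLoopI_eq_bLoop chs num_channels n 0 PySem.Dict.empty (by omega)
    rw [hlen] at hbr
    simp only [Nat.cast_zero, List.drop_zero] at hbr
    rw [hlyr, ← hch]
    rw [hbr, hcr, ← hc0, hmain]
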